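-- pv_equiv track=rewrite | github.com/cseas002/epl326 | quiz 2/hexString.py | hex_to_little_endian
-- ===== SOURCE A (Python) =====
-- def hex_to_little_endian(hex_string):
--     hex_val = int(hex_string, 16)
--     hex_val = hex(hex_val)[2:]
--
--     if len(hex_val) % 2 != 0:
--         hex_val = '0' + hex_val
--
--     # Convert the hex string to bytes
--     hex_bytes = bytes.fromhex(str(hex_val))
--
--     # Convert the bytes to little endian order
--     little_endian = hex_bytes[::-1]
--
--     val = ''.join([f'\\x{byte:02x}' for byte in little_endian])
--     # Format the little endian bytes as a string with \x before each byte
--     extra0 = 16 - len(val)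
--     for i in range(0, extra0, 4):
--         val = "\\x00" + val
--
--     return val
-- ===== SOURCE B (Python) =====
-- def hex_to_little_endian(hex_string):
--     value = int(hex_string, 16)
--     nbytes = max((value.bit_length() + 7) // 8, 1)
--     data = value.to_bytes(nbytes, 'little')
--     s = ''.join(f'\\x{b:02x}' for b in data)
--     return '\\x00' * (4 - nbytes) + s
-- ===== Notes on version B (the rewrite author's own statement) =====
-- stated objective: idiomatic
-- what changed: B replaces A's re-rendering of the value to a hex string, manual pairing into bytes, byte reversal and a \x00-prepending range loop by the closed-form little-endian byte decomposition int.to_bytes plus a computed zero-byte prefix of width 4-nbytes.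
import Mathlib
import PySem

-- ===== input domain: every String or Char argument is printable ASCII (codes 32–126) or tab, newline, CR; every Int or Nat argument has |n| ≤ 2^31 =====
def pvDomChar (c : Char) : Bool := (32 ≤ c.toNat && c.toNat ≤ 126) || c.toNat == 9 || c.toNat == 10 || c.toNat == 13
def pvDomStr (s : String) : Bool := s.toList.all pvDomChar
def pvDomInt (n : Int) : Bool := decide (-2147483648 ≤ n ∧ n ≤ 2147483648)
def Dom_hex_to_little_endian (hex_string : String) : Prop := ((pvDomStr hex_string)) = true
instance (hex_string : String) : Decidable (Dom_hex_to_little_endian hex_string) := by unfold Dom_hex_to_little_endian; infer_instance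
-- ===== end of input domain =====

-- B replaces A's hex re-render / pairing / reversal / padding loop by a closed-form
-- little-endian base-256 byte decomposition (int.to_bytes); objective: idiomatic, not faster.

-- ===== PORT A =====
-- Shared hand port of Python's int(s, 16) (used verbatim by both Pythons): strip whitespace,
-- optional sign, optional 0x/0X prefix, hex digits with single underscores between digits
-- (one underscore also allowed right after the prefix); none = ValueError. Exact on ASCII input.
def pvHexDigit? (c : Char) : Option Nat :=
  if '0' ≤ c ∧ c ≤ '9' then some (c.toNat - 48)
  else if 'a' ≤ c ∧ c ≤ 'f' then some (c.toNat - 87)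
  else if 'A' ≤ c ∧ c ≤ 'F' then some (c.toNat - 55)
  else none

def pvIsSpace (c : Char) : Bool := c = ' ' || c = '\t' || c = '\n' || c = '\r' || c.toNat == 11 || c.toNat == 12

def pvStrip (cs : List Char) : List Char :=
  ((cs.dropWhile pvIsSpace).reverse.dropWhile pvIsSpace).reverse

def pvDigits? : List Char → Nat → Option Nat
  | [], acc => some acc
  | '_' :: rest, acc =>
    match rest with
    | [] => none
    | d :: rest' =>
      match pvHexDigit? d with
      | some hv => pvDigits? rest' (acc * 16 + hv)
      | none => none
  | c :: rest, acc =>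
    match pvHexDigit? c with
    | some hv => pvDigits? rest (acc * 16 + hv)
    | none => none

def pvParseMag? : List Char → Option Nat
  | '0' :: 'x' :: rest => if rest = [] then none else pvDigits? rest 0
  | '0' :: 'X' :: rest => if rest = [] then none else pvDigits? rest 0
  | c :: rest =>
    match pvHexDigit? c with
    | some hv => pvDigits? rest hv
    | none => none
  | [] => none

def pvParseHex? (cs : List Char) : Option Int :=
  match pvStrip cs with
  | '+' :: rest => (pvParseMag? rest).map (fun n => (n : Int))
  | '-' :: rest => (pvParseMag? rest).map (fun n => -(n : Int))
  | rest => (pvParseMag? rest).map (fun n => (n : Int))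

def pvHexDigitChar (n : Nat) : Char := if n < 10 then Char.ofNat (48 + n) else Char.ofNat (87 + n)

-- hex(n)[2:] for n > 0 builds digits most-significant first; [] for 0
def pvNatToHexCore (n : Nat) : List Char :=
  if h : n = 0 then []
  else pvNatToHexCore (n / 16) ++ [pvHexDigitChar (n % 16)]
decreasing_by exact Nat.div_lt_self (Nat.pos_of_ne_zero h) (by norm_num)

def pvNatToHex (n : Nat) : List Char := if n = 0 then ['0'] else pvNatToHexCore n

-- bytes.fromhex on an even-length string of hex digits
def pvFromHexPairs : List Char → List Nat
  | a :: b :: rest => ((pvHexDigit? a).getD 0 * 16 + (pvHexDigit? b).getD 0) :: pvFromHexPairs rest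
  | _ => []

def pvFmtByte (b : Nat) : List Char := ['\\', 'x', pvHexDigitChar (b / 16), pvHexDigitChar (b % 16)]

def pvPad00 : List Char := ['\\', 'x', '0', '0']

def hex_to_little_endian (hex_string : String) : String :=
  match pvParseHex? hex_string.toList with
  | none => ""        -- int() raised ValueError; outside Pre_
  | some v =>
    if v < 0 then ""  -- hex(v)[2:] = "x…", bytes.fromhex raises ValueError; outside Pre_
    else
      let n := v.toNat
      let hexVal := pvNatToHex n
      let hexVal := if hexVal.length % 2 ≠ 0 then '0' :: hexVal else hexVal
      let hexBytes := pvFromHexPairs hexVal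
      let littleEndian := hexBytes.reverse
      let val := (littleEndian.map pvFmtByte).flatten
      let extra0 : Int := 16 - (val.length : Int)
      let val := (PySem.List.pyRange 0 extra0 4).foldl (fun acc _ => pvPad00 ++ acc) val
      String.mk val

-- ===== PORT B =====
def pvBitLength (n : Nat) : Nat := if n = 0 then 0 else n.log2 + 1

-- value.to_bytes(k, 'little'): k base-256 digits, least significant first
def pvToBytesLE : Nat → Nat → List Nat
  | _, 0 => []
  | n, k + 1 => (n % 256) :: pvToBytesLE (n / 256) k

def pvFmtByteB (b : Nat) : List Char := ['\\', 'x', pvHexDigitChar (b / 16), pvHexDigitChar (b % 16)]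

def pvZero00 : List Char := ['\\', 'x', '0', '0']

def hex_to_little_endian_alt (hex_string : String) : String :=
  match pvParseHex? hex_string.toList with
  | none => ""        -- int() raised ValueError; outside Pre_
  | some v =>
    if v < 0 then ""  -- to_bytes raises OverflowError; outside Pre_
    else
      let n := v.toNat
      let nbytes := max ((pvBitLength n + 7) / 8) 1
      let data := pvToBytesLE n nbytes
      let s := (data.map pvFmtByteB).flatten
      -- '\x00' * (4 - nbytes): Nat subtraction = Python's empty string on a nonpositive count
      String.mk ((List.replicate (4 - nbytes) pvZero00).flatten ++ s)

-- ===== PRECONDITION & SPEC =====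
-- Pre_ = exactly the inputs where int(s,16) succeeds nonnegatively (incl. "-0"-like zeros):
-- excluded are only inputs where A raises (ValueError from int() or, for negative values,
-- from bytes.fromhex on hex(v)[2:] = 'x…').
def pvIsHexDig (c : Char) : Bool := (pvHexDigit? c).isSome

def pvGTail : List Char → Bool
  | [] => true
  | '_' :: [] => false
  | '_' :: c :: r => pvIsHexDig c && pvGTail r
  | c :: r => pvIsHexDig c && pvGTail r

def pvPreOk (cs0 : List Char) : Bool :=
  let cs1 := pvStrip cs0
  let neg := match cs1 with | '-' :: _ => true | _ => false
  let cs := match cs1 with | '+' :: r => r | '-' :: r => r | r => r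
  let ok := match cs with
    | '0' :: 'x' :: r => !r.isEmpty && pvGTail r
    | '0' :: 'X' :: r => !r.isEmpty && pvGTail r
    | c :: r => pvIsHexDig c && pvGTail r
    | [] => false
  ok && (!neg || cs.all (fun c => c = '0' || c = '_' || c = 'x' || c = 'X'))

def Pre_hex_to_little_endian (hex_string : String) : Prop := pvPreOk hex_string.toList = true
instance (hex_string : String) : Decidable (Pre_hex_to_little_endian hex_string) := by
  unfold Pre_hex_to_little_endian; infer_instance

def pvWitness_hex_to_little_endian : String := "1234"

def Spec_hex_to_little_endian (hex_string : String) (out : String) : Prop := out = hex_to_little_endian_alt hex_string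
instance (hex_string : String) (out : String) : Decidable (Spec_hex_to_little_endian hex_string out) := by unfold Spec_hex_to_little_endian; infer_instance

-- ===== CLAIM (what is proved, stated in full; the proofs are below) =====
def Claim_equal_hex_to_little_endian : Prop := ∀ (hex_string : String), Dom_hex_to_little_endian hex_string → Pre_hex_to_little_endian hex_string → Spec_hex_to_little_endian hex_string (hex_to_little_endian hex_string)

-- ===== LEMMAS AND PROOFS =====

-- fixed-width big-endian hex rendering (proof device)
def pvHexFix : Nat → Nat → List Char
  | _, 0 => []
  | n, k + 1 => pvHexFix (n / 16) k ++ [pvHexDigitChar (n % 16)]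

theorem pvLen_hexFix (n k : Nat) : (pvHexFix n k).length = k := by
  induction k generalizing n with
  | zero => rfl
  | succ k ih => simp [pvHexFix, ih]

theorem pvHexFix_zero (k : Nat) : pvHexFix 0 k = List.replicate k '0' := by
  induction k with
  | zero => rfl
  | succ k ih =>
    show pvHexFix (0 / 16) k ++ [pvHexDigitChar (0 % 16)] = _
    rw [Nat.zero_div] at *
    rw [ih, show pvHexDigitChar (0 % 16) = '0' from rfl, ← List.replicate_succ']

theorem pvHexFix_core (k : Nat) : ∀ n, n < 16 ^ k →
    pvHexFix n k = List.replicate (k - (pvNatToHexCore n).length) '0' ++ pvNatToHexCore n := by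
  induction k with
  | zero =>
    intro n hn
    interval_cases n
    simp [pvHexFix, pvNatToHexCore]
  | succ k ih =>
    intro n hn
    by_cases h0 : n = 0
    · subst h0
      rw [pvHexFix_zero]
      simp [pvNatToHexCore]
    · rw [pvNatToHexCore, dif_neg h0]
      have hdiv : n / 16 < 16 ^ k := by
        rw [Nat.div_lt_iff_lt_mul (by norm_num)]
        calc n < 16 ^ (k + 1) := hn
        _ = 16 ^ k * 16 := by ring
      show pvHexFix (n / 16) k ++ [pvHexDigitChar (n % 16)] = _
      rw [ih (n / 16) hdiv]
      have hle : (pvNatToHexCore (n / 16)).length ≤ k := by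
        have := congrArg List.length (ih (n / 16) hdiv)
        rw [pvLen_hexFix] at this
        simp at this
        omega
      simp only [List.length_append, List.length_singleton]
      have : k + 1 - ((pvNatToHexCore (n / 16)).length + 1) = k - (pvNatToHexCore (n / 16)).length := by omega
      rw [this, List.append_assoc]

theorem pvCore_len_bounds : ∀ n, 0 < n →
    16 ^ ((pvNatToHexCore n).length - 1) ≤ n ∧ n < 16 ^ (pvNatToHexCore n).length := by
  intro n
  induction n using Nat.strong_induction_on with
  | _ n ih =>
    intro hn
    rw [pvNatToHexCore, dif_neg (by omega : n ≠ 0)]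
    by_cases h16 : n < 16
    · have : n / 16 = 0 := Nat.div_eq_of_lt h16
      rw [this]
      simp [pvNatToHexCore]
      omega
    · have hpos : 0 < n / 16 := Nat.div_pos (by omega) (by norm_num)
      have hlt : n / 16 < n := Nat.div_lt_self (by omega) (by norm_num)
      obtain ⟨h1, h2⟩ := ih (n / 16) hlt hpos
      have hL : 1 ≤ (pvNatToHexCore (n / 16)).length := by
        rw [pvNatToHexCore, dif_neg (by omega : n / 16 ≠ 0)]
        simp
      set L := (pvNatToHexCore (n / 16)).length with hLdef
      simp only [List.length_append, List.length_singleton]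
      constructor
      · have : 16 ^ L ≤ 16 * (n / 16) := by
          calc 16 ^ L = 16 * 16 ^ (L - 1) := by
                rw [← pow_succ']
                congr 1
                omega
          _ ≤ 16 * (n / 16) := by omega
        have h16n : 16 * (n / 16) ≤ n := by omega
        have : L + 1 - 1 = L := by omega
        rw [this]
        omega
      · have : n < 16 * (n / 16 + 1) := by omega
        calc n < 16 * (n / 16 + 1) := this
        _ ≤ 16 * 16 ^ L := by omega
        _ = 16 ^ (L + 1) := by rw [← pow_succ']

theorem pvNatToHex_len_pos (n : Nat) : 1 ≤ (pvNatToHex n).length := by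
  rw [pvNatToHex]
  split
  · decide
  · rw [pvNatToHexCore, dif_neg (by assumption)]
    simp

theorem pvPadded_eq (n : Nat) :
    (if (pvNatToHex n).length % 2 ≠ 0 then '0' :: pvNatToHex n else pvNatToHex n)
      = pvHexFix n (2 * (((pvNatToHex n).length + 1) / 2)) := by
  by_cases h0 : n = 0
  · subst h0
    rw [show pvNatToHex 0 = ['0'] from rfl]
    simp [pvHexFix_zero, List.replicate]
  · have hcore : pvNatToHex n = pvNatToHexCore n := by rw [pvNatToHex, if_neg h0]
    obtain ⟨h1, h2⟩ := pvCore_len_bounds n (Nat.pos_of_ne_zero h0)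
    have hd1 : 1 ≤ (pvNatToHexCore n).length := by
      have := pvNatToHex_len_pos n
      rwa [hcore] at this
    rw [hcore]
    rw [pvHexFix_core (2 * (((pvNatToHexCore n).length + 1) / 2)) n
      (lt_of_lt_of_le h2 (Nat.pow_le_pow_right (by norm_num) (by omega)))]
    by_cases hpar : (pvNatToHexCore n).length % 2 = 0
    · rw [if_neg (by omega)]
      rw [show 2 * (((pvNatToHexCore n).length + 1) / 2) - (pvNatToHexCore n).length = 0 by omega]
      simp
    · rw [if_pos (by omega)]
      rw [show 2 * (((pvNatToHexCore n).length + 1) / 2) - (pvNatToHexCore n).length = 1 by omega]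
      simp

theorem pvDigit_inv (x : Nat) (hx : x < 16) : pvHexDigit? (pvHexDigitChar x) = some x := by
  interval_cases x <;> decide

theorem pvPairs_append : ∀ (xs : List Char), xs.length % 2 = 0 → ∀ ys,
    pvFromHexPairs (xs ++ ys) = pvFromHexPairs xs ++ pvFromHexPairs ys
  | [], _, ys => by simp [pvFromHexPairs]
  | [a], h, ys => by simp at h
  | a :: b :: rest, h, ys => by
    simp only [List.length_cons] at h
    simp only [List.cons_append, pvFromHexPairs]
    rw [pvPairs_append rest (by omega) ys]

theorem pvPairs_fix : ∀ (m n : Nat), pvFromHexPairs (pvHexFix n (2 * m)) = (pvToBytesLE n m).reverse := by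
  intro m
  induction m with
  | zero => intro n; rfl
  | succ m ih =>
    intro n
    have e1 : 2 * (m + 1) = (2 * m + 1) + 1 := by omega
    rw [e1]
    show pvFromHexPairs (pvHexFix (n / 16) (2 * m + 1) ++ [pvHexDigitChar (n % 16)]) = _
    rw [show pvHexFix (n / 16) (2 * m + 1) = pvHexFix (n / 16 / 16) (2 * m) ++ [pvHexDigitChar (n / 16 % 16)] from rfl]
    rw [Nat.div_div_eq_div_mul]
    rw [List.append_assoc]
    rw [pvPairs_append _ (by rw [pvLen_hexFix]; omega) _]
    rw [ih (n / 256)]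
    show _ = (pvToBytesLE n (m + 1)).reverse
    rw [pvToBytesLE, List.reverse_cons]
    congr 1
    show pvFromHexPairs [pvHexDigitChar (n / 16 % 16), pvHexDigitChar (n % 16)] = _
    rw [pvFromHexPairs]
    rw [pvDigit_inv _ (Nat.mod_lt _ (by norm_num)), pvDigit_inv _ (Nat.mod_lt _ (by norm_num))]
    show [(n / 16 % 16) * 16 + n % 16] = [n % 256]
    congr 1
    omega

theorem pvFlatten_fmt_len (L : List Nat) : ((L.map pvFmtByte).flatten).length = 4 * L.length := by
  induction L with
  | nil => rfl
  | cons a L ih => simp [pvFmtByte, ih]; omega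

theorem pvFoldl_prepend (l : List Int) (v : List Char) :
    l.foldl (fun acc _ => pvPad00 ++ acc) v = (List.replicate l.length pvPad00).flatten ++ v := by
  induction l generalizing v with
  | nil => rfl
  | cons a l ih =>
    show l.foldl _ (pvPad00 ++ v) = _
    rw [ih (pvPad00 ++ v)]
    rw [List.length_cons, List.replicate_succ', List.flatten_append]
    simp [List.append_assoc, pvPad00]

theorem pvRange_count (m : Nat) (hm : 1 ≤ m) :
    (PySem.List.pyRange 0 (16 - (4 * m : Nat)) 4).length = 4 - m := by
  match m, hm with
  | 1, _ => decide
  | 2, _ => decide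
  | 3, _ => decide
  | (k + 4), _ =>
    have : (16 - (4 * (k + 4) : Nat) : Int) ≤ 0 := by push_cast; omega
    rw [PySem.List.pyRange_of_pos _ _ (by norm_num)]
    rw [if_neg (by omega)]
    simp

theorem pvNbytes_eq (n : Nat) :
    max ((pvBitLength n + 7) / 8) 1 = ((pvNatToHex n).length + 1) / 2 := by
  by_cases h0 : n = 0
  · subst h0; decide
  · have hcore : pvNatToHex n = pvNatToHexCore n := by rw [pvNatToHex, if_neg h0]
    obtain ⟨h1, h2⟩ := pvCore_len_bounds n (Nat.pos_of_ne_zero h0)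
    have hd1 : 1 ≤ (pvNatToHexCore n).length := by
      have := pvNatToHex_len_pos n
      rwa [hcore] at this
    have hbl : pvBitLength n = n.log2 + 1 := by rw [pvBitLength, if_neg h0]
    have hb1 : 2 ^ n.log2 ≤ n := Nat.log2_self_le h0
    have hb2 : n < 2 ^ (n.log2 + 1) := Nat.lt_log2_self
    have h16 : ∀ k : Nat, (16 : Nat) ^ k = 2 ^ (4 * k) := by
      intro k
      rw [show (16 : Nat) = 2 ^ 4 from rfl, ← pow_mul]
    have hA : 4 * ((pvNatToHexCore n).length - 1) < n.log2 + 1 := by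
      have hlt : 2 ^ (4 * ((pvNatToHexCore n).length - 1)) < 2 ^ (n.log2 + 1) := by
        calc 2 ^ (4 * ((pvNatToHexCore n).length - 1)) = 16 ^ ((pvNatToHexCore n).length - 1) := (h16 _).symm
        _ ≤ n := h1
        _ < 2 ^ (n.log2 + 1) := hb2
      exact (Nat.pow_lt_pow_iff_right (by norm_num)).mp hlt
    have hB : n.log2 < 4 * (pvNatToHexCore n).length := by
      have hlt : 2 ^ n.log2 < 2 ^ (4 * (pvNatToHexCore n).length) := by
        calc 2 ^ n.log2 ≤ n := hb1
        _ < 16 ^ (pvNatToHexCore n).length := h2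
        _ = 2 ^ (4 * (pvNatToHexCore n).length) := h16 _
      exact (Nat.pow_lt_pow_iff_right (by norm_num)).mp hlt
    rw [hbl, hcore]
    omega

-- A's and B's byte formatters coincide
theorem pvFmt_eq : pvFmtByte = pvFmtByteB := rfl

-- the rendering halves agree for every nonnegative value
theorem pvLen_toBytes : ∀ (k n : Nat), (pvToBytesLE n k).length = k
  | 0, _ => rfl
  | k + 1, n => by simp [pvToBytesLE, pvLen_toBytes k (n / 256)]

-- the rendering halves agree for every nonnegative value
theorem pvRender_eq (n : Nat) :
    (let hexVal := pvNatToHex n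
     let hexVal := if hexVal.length % 2 ≠ 0 then '0' :: hexVal else hexVal
     let hexBytes := pvFromHexPairs hexVal
     let littleEndian := hexBytes.reverse
     let val := (littleEndian.map pvFmtByte).flatten
     let extra0 : Int := 16 - (val.length : Int)
     (PySem.List.pyRange 0 extra0 4).foldl (fun acc _ => pvPad00 ++ acc) val)
    = (let nbytes := max ((pvBitLength n + 7) / 8) 1
       let data := pvToBytesLE n nbytes
       (List.replicate (4 - nbytes) pvZero00).flatten ++ (data.map pvFmtByteB).flatten) := by
  simp only
  have hd1 : 1 ≤ (pvNatToHex n).length := pvNatToHex_len_pos n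
  have hm1 : 1 ≤ ((pvNatToHex n).length + 1) / 2 := by omega
  rw [pvPadded_eq n, pvPairs_fix (((pvNatToHex n).length + 1) / 2) n, List.reverse_reverse]
  rw [pvFoldl_prepend, pvFlatten_fmt_len, pvLen_toBytes]
  rw [pvRange_count _ hm1, pvNbytes_eq n, ← pvFmt_eq]
  rfl

-- ===== VERDICT (by name: the statement is the Claim_ definition above) =====
theorem hex_to_little_endian_spec : Claim_equal_hex_to_little_endian := by
  intro s _ _
  unfold Spec_hex_to_little_endian hex_to_little_endian hex_to_little_endian_alt
  cases hp : pvParseHex? s.toList with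
  | none => rfl
  | some v =>
    by_cases hv : v < 0
    · simp [hv]
    · simp only [hv, if_false]
      exact congrArg String.mk (pvRender_eq v.toNat)
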